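-- pv_equiv track=rewrite | github.com/otugayev/tensorrag | tensorrag/answering.py | _best_related_axis_nodes
-- ===== SOURCE A (Python) =====
-- def _node_display_name(node_id: str) -> str:
--     if "." in node_id:
--         return node_id.rsplit(".", 1)[-1]
--     return node_id
--
-- def _node_depth(
--     axes: dict[str, dict[str, dict[str, str | None]]],
--     axis_name: str,
--     node_id: str,
-- ) -> int:
--     depth = 0
--     current = node_id
--     while current:
--         current = axes.get(axis_name, {}).get(current, {}).get("parent")
--         if current:
--             depth += 1
--     return depth
--
-- def _branch_distance(
--     axes: dict[str, dict[str, dict[str, str | None]]],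
--     axis_name: str,
--     left_node: str,
--     right_node: str,
-- ) -> int | None:
--     if left_node not in axes.get(axis_name, {}) or right_node not in axes.get(axis_name, {}):
--         return None
--
--     if left_node == right_node:
--         return 0
--
--     left_distances = {left_node: 0}
--     current = left_node
--     distance = 0
--     while True:
--         parent = axes.get(axis_name, {}).get(current, {}).get("parent")
--         if not parent:
--             break
--         distance += 1
--         left_distances[parent] = distance
--         current = parent
--
--     current = right_node
--     distance = 0
--     while True:
--         if current in left_distances:
--             return distance + left_distances[current]
--         parent = axes.get(axis_name, {}).get(current, {}).get("parent")
--         if not parent: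
--             break
--         distance += 1
--         current = parent
--
--     return None
--
-- def _best_related_axis_nodes(
--     axes: dict[str, dict[str, dict[str, str | None]]],
--     admissible_cells: list[dict[str, str]],
--     source_axis: str,
--     source_node: str,
--     target_axis: str,
-- ) -> list[str]:
--     candidates: list[tuple[int, int, int, str]] = []
--     for cell in admissible_cells:
--         source_cell_node = cell.get(source_axis)
--         target_cell_node = cell.get(target_axis)
--         if not source_cell_node or not target_cell_node:
--             continue
--         distance = _branch_distance(axes, source_axis, source_node, source_cell_node)
--         if distance is None:
--             continue
--         candidates.append(
--             (
--                 distance,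
--                 -_node_depth(axes, source_axis, source_cell_node),
--                 _node_depth(axes, target_axis, target_cell_node),
--                 target_cell_node,
--             )
--         )
--
--     if not candidates:
--         return []
--
--     candidates.sort()
--     best_rank = candidates[0][:2]
--     best_targets = {
--         (target_depth, target_node)
--         for distance, depth_rank, target_depth, target_node in candidates
--         if (distance, depth_rank) == best_rank
--     }
--     return [
--         target_node
--         for _, target_node in sorted(best_targets, key=lambda item: (item[0], _node_display_name(item[1]), item[1]))
--     ]
-- ===== SOURCE B (Python) =====
-- def _node_display_name(node_id: str) -> str:
--     if "." in node_id:
--         return node_id.rsplit(".", 1)[-1]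
--     return node_id
--
--
-- def _ancestor_chain(nodes, node):
--     # the node followed by its chain of truthy parents
--     out = [node]
--     cur = node
--     while True:
--         p = nodes.get(cur, {}).get("parent")
--         if not p:
--             break
--         out.append(p)
--         cur = p
--     return out
--
--
-- def _best_related_axis_nodes(
--     axes,
--     admissible_cells,
--     source_axis,
--     source_node,
--     target_axis,
-- ):
--     # Precompute the source node's ancestor->distance map once, then do a single
--     # min-scan over the cells: branch distance is found by walking a cell node's
--     # ancestor chain until it meets that map, depth is chain length - 1, and a
--     # running best rank (distance, -depth) with its set of (target_depth, target)
--     # items replaces A's build-all / sort-all / filter-by-minimum passes.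
--     src_nodes = axes.get(source_axis, {})
--     tgt_nodes = axes.get(target_axis, {})
--     if source_node not in src_nodes:
--         return []
--     src_pos = {}
--     for i, n in enumerate(_ancestor_chain(src_nodes, source_node)):
--         src_pos[n] = i
--     best_rank = None
--     best_items = set()
--     for cell in admissible_cells:
--         s = cell.get(source_axis)
--         t = cell.get(target_axis)
--         if not s or not t:
--             continue
--         if s not in src_nodes:
--             continue
--         s_chain = _ancestor_chain(src_nodes, s)
--         distance = None
--         for j, node in enumerate(s_chain):
--             if node in src_pos:
--                 distance = j + src_pos[node]
--                 break
--         if distance is None: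
--             continue
--         rank = (distance, 1 - len(s_chain))
--         item = (len(_ancestor_chain(tgt_nodes, t)) - 1, t)
--         if best_rank is None or rank < best_rank:
--             best_rank, best_items = rank, {item}
--         elif rank == best_rank:
--             best_items.add(item)
--     if best_rank is None:
--         return []
--     return [
--         n
--         for _, n in sorted(best_items, key=lambda it: (it[0], _node_display_name(it[1]), it[1]))
--     ]
-- ===== Notes on version B (the rewrite author's own statement) =====
-- stated objective: alternative
-- what changed: B precomputes the source node's ancestor->distance map once and represents every walk as an explicit ancestor-chain list (distance = meet of a chain with that map, depth = chain length - 1), then does a single min-scan over the cells keeping the running best (distance, -depth) rank and the set of (target_depth, target) items attaining it and sorting only that set - instead of A's per-cell two-pointer walks followed by build-all-candidates, sort the full list and filter by the minimal rank.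
-- outside the precondition, e.g. on _best_related_axis_nodes({'x': {'a': {'parent': 'a'}}}, [], 'x', 'n', 'x'): A returns [], B returns []
import Mathlib
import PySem

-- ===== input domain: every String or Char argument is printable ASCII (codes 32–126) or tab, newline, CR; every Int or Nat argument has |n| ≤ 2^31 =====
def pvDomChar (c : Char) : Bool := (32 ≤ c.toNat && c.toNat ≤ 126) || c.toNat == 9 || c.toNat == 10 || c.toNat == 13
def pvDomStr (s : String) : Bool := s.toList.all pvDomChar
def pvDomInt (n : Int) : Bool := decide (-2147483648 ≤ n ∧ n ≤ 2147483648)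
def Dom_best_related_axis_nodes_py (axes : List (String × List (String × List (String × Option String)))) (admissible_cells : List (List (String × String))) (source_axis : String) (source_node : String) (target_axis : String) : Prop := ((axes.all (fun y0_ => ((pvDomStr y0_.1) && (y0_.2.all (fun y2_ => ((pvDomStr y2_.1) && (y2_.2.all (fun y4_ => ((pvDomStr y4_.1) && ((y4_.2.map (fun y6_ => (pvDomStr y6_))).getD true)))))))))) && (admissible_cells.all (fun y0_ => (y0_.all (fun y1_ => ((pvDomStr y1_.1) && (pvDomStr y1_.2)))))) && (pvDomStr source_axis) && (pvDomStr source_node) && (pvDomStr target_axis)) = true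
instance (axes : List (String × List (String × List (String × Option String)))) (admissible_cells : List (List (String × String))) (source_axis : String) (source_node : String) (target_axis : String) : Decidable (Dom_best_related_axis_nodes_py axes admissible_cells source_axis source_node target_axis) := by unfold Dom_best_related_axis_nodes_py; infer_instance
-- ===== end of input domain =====

-- B precomputes the source node's ancestor->distance map once and replaces A's two-pointer-walk
-- distance and depth loops by ancestor-chain lists, doing a single min-scan over the cells instead
-- of A's build-all-candidates / sort-the-full-list / filter-by-minimal-rank passes
-- (objective: alternative).

-- ===== PORT A =====
-- A-side helpers: A's module-level helpers (_node_depth, _branch_distance, _node_display_name)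

-- truthiness of a Python 'str | None' value
def pyTruthy : Option String → Bool
  | none => false
  | some s => !(s == "")

-- axes.get(axis_name, {})
def axisNodes (axes : List (String × List (String × List (String × Option String)))) (axis : String) : List (String × List (String × Option String)) :=
  ((PySem.Dict.mk axes).get? axis).getD []

-- axes.get(axis_name, {}).get(current, {}).get("parent")  (None when any lookup misses)
def pyParent (axes : List (String × List (String × List (String × Option String)))) (axis current : String) : Option String :=
  match (PySem.Dict.mk (axisNodes axes axis)).get? current with
  | none => none
  | some attrs => ((PySem.Dict.mk attrs).get? "parent").getD none

-- _node_depth's while loop; the fuel bounds the iterations; wherever the Python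
-- loop terminates its chain is acyclic and shorter than the fuel, so the port is exact there
-- (on a parent-pointer cycle the Python loops forever and returns nothing)
def nodeDepthGo (axes : List (String × List (String × List (String × Option String)))) (axis : String) : Nat → Option String → Int → Int
  | 0, _, depth => depth
  | fuel + 1, current, depth =>
    if pyTruthy current then
      let nxt := pyParent axes axis (current.getD "")
      nodeDepthGo axes axis fuel nxt (if pyTruthy nxt then depth + 1 else depth)
    else depth

def nodeDepth (axes : List (String × List (String × List (String × Option String)))) (axis node_id : String) : Int :=
  nodeDepthGo axes axis ((axisNodes axes axis).length + 2) (some node_id) 0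

-- first while loop of _branch_distance: build left_distances
def leftDistGo (axes : List (String × List (String × List (String × Option String)))) (axis : String) : Nat → String → Int → PySem.Dict String Int → PySem.Dict String Int
  | 0, _, _, dists => dists
  | fuel + 1, current, distance, dists =>
    let parent := pyParent axes axis current
    if pyTruthy parent then
      leftDistGo axes axis fuel (parent.getD "") (distance + 1) (dists.insert (parent.getD "") (distance + 1))
    else dists

-- second while loop of _branch_distance
def rightGo (axes : List (String × List (String × List (String × Option String)))) (axis : String) (ldists : PySem.Dict String Int) : Nat → String → Int → Option Int
  | 0, _, _ => none
  | fuel + 1, current, distance =>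
    match ldists.get? current with
    | some d => some (distance + d)
    | none =>
      let parent := pyParent axes axis current
      if pyTruthy parent then rightGo axes axis ldists fuel (parent.getD "") (distance + 1)
      else none

def branchDistance (axes : List (String × List (String × List (String × Option String)))) (axis left_node right_node : String) : Option Int :=
  if !((PySem.Dict.mk (axisNodes axes axis)).contains left_node) || !((PySem.Dict.mk (axisNodes axes axis)).contains right_node) then none
  else if left_node == right_node then some 0
  else
    let fuel := (axisNodes axes axis).length + 2
    let ldists := leftDistGo axes axis fuel left_node 0 (PySem.Dict.insert (PySem.Dict.mk []) left_node 0)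
    rightGo axes axis ldists fuel right_node 0

-- _node_display_name; node_id.rsplit(".", 1)[-1] is exactly the suffix after the LAST '.'
def nodeDisplayName (node_id : String) : String :=
  if PySem.Str.isIn "." node_id then
    String.ofList ((node_id.toList.reverse.takeWhile (fun c => c ≠ '.')).reverse)
  else node_id

-- A's per-cell loop body: the candidate 4-tuple
-- (distance, -source_depth, target_depth, target_node), or none where the loop 'continue's
def candOf (axes : List (String × List (String × List (String × Option String)))) (source_axis source_node target_axis : String) (cell : List (String × String)) : Option (Int × Int × Int × String) :=
  let s? := (PySem.Dict.mk cell).get? source_axis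
  let t? := (PySem.Dict.mk cell).get? target_axis
  if !(pyTruthy s?) || !(pyTruthy t?) then none
  else
    match branchDistance axes source_axis source_node (s?.getD "") with
    | none => none
    | some distance =>
      some (distance, -(nodeDepth axes source_axis (s?.getD "")), nodeDepth axes target_axis (t?.getD ""), t?.getD "")

-- candidates.sort(): Python compares the 4-tuples lexicographically
def cKey (c : Int × Int × Int × String) : Lex (Int × Lex (Int × Lex (Int × String))) :=
  toLex (c.1, toLex (c.2.1, toLex (c.2.2.1, c.2.2.2)))

-- the final sort key (item[0], _node_display_name(item[1]), item[1]), lexicographic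
def itemKey (item : Int × String) : Lex (Int × Lex (String × String)) :=
  toLex (item.1, toLex (nodeDisplayName item.2, item.2))

def best_related_axis_nodes_py (axes : List (String × List (String × List (String × Option String)))) (admissible_cells : List (List (String × String))) (source_axis : String) (source_node : String) (target_axis : String) : List String :=
  let candidates := admissible_cells.foldl (fun acc cell =>
    match candOf axes source_axis source_node target_axis cell with
    | none => acc
    | some c => acc ++ [c]) []
  if candidates.isEmpty then []
  else
    let sortedC := PySem.List.sorted candidates cKey false
    let best_rank := ((sortedC.headD (0, 0, 0, "")).1, (sortedC.headD (0, 0, 0, "")).2.1)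
    let best_targets := PySem.Set.ofList ((sortedC.filter (fun c => (c.1, c.2.1) == best_rank)).map (fun c => (c.2.2.1, c.2.2.2)))
    (PySem.List.sorted best_targets itemKey false).map (·.2)

-- ===== PORT B =====
-- B-side helpers (Source B): _ancestor_chain, the src_pos map, the meet loop, the min-scan body

-- nodes.get(cur, {}).get("parent") inside _ancestor_chain's while loop
def bParent (nodes : List (String × List (String × Option String))) (cur : String) : Option String :=
  match (PySem.Dict.mk nodes).get? cur with
  | none => none
  | some attrs => ((PySem.Dict.mk attrs).get? "parent").getD none

-- _ancestor_chain's while-True loop as fuel recursion; wherever the Python terminates the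
-- chain is acyclic and shorter than the fuel, so the port is exact there
def chainGo (nodes : List (String × List (String × Option String))) : Nat → String → List String
  | 0, cur => [cur]
  | fuel + 1, cur =>
    let p := bParent nodes cur
    if pyTruthy p then cur :: chainGo nodes fuel (p.getD "") else [cur]

def ancestorChain (nodes : List (String × List (String × Option String))) (node : String) : List String :=
  chainGo nodes (nodes.length + 2) node

-- 'for i, n in enumerate(chain): src_pos[n] = i'
def posOf (chain : List String) : PySem.Dict String Int :=
  (PySem.List.enumerate chain).foldl (fun d p => d.insert p.2 p.1) (PySem.Dict.mk [])

-- 'for j, node in enumerate(s_chain): if node in src_pos: distance = j + src_pos[node]; break'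
def meetGo (pos : PySem.Dict String Int) : List (Int × String) → Option Int
  | [] => none
  | (j, n) :: rest =>
    match pos.get? n with
    | some i => some (j + i)
    | none => meetGo pos rest

-- B's per-cell min-scan body: continue on missing/falsy cell nodes, on an unknown source node
-- and on a failed meet; otherwise fold (rank, item) into the running (best_rank, best_items)
def bStep2 (src_nodes tgt_nodes : List (String × List (String × Option String))) (src_pos : PySem.Dict String Int) (source_axis target_axis : String) (st : Option ((Int × Int) × PySem.Set (Int × String))) (cell : List (String × String)) : Option ((Int × Int) × PySem.Set (Int × String)) :=
  let s? := (PySem.Dict.mk cell).get? source_axis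
  let t? := (PySem.Dict.mk cell).get? target_axis
  if !(pyTruthy s?) || !(pyTruthy t?) then st
  else if !((PySem.Dict.mk src_nodes).contains (s?.getD "")) then st
  else
    let sChain := ancestorChain src_nodes (s?.getD "")
    match meetGo src_pos (PySem.List.enumerate sChain) with
    | none => st
    | some distance =>
      let rank : Int × Int := (distance, 1 - (sChain.length : Int))
      let item : Int × String := (((ancestorChain tgt_nodes (t?.getD "")).length : Int) - 1, t?.getD "")
      match st with
      | none => some (rank, PySem.Set.ofList [item])
      | some (best_rank, best_items) =>
        if rank.1 < best_rank.1 || (rank.1 == best_rank.1 && rank.2 < best_rank.2) then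
          some (rank, PySem.Set.ofList [item])
        else if rank == best_rank then some (best_rank, PySem.Set.add best_items item)
        else some (best_rank, best_items)

def best_related_axis_nodes_py_alt (axes : List (String × List (String × List (String × Option String)))) (admissible_cells : List (List (String × String))) (source_axis : String) (source_node : String) (target_axis : String) : List String :=
  let src_nodes := ((PySem.Dict.mk axes).get? source_axis).getD []
  let tgt_nodes := ((PySem.Dict.mk axes).get? target_axis).getD []
  if !((PySem.Dict.mk src_nodes).contains source_node) then []
  else
    let src_pos := posOf (ancestorChain src_nodes source_node)
    match admissible_cells.foldl (bStep2 src_nodes tgt_nodes src_pos source_axis target_axis) none with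
    | none => []
    | some (_, best_items) => (PySem.List.sorted best_items itemKey false).map (·.2)

-- ===== PRECONDITION & SPEC =====
-- one step along a parent pointer: none once the chain has died out (unknown node, no parent,
-- or a falsy parent)
def parentStep (nodes : List (String × List (String × Option String))) : Option String → Option String
  | none => none
  | some s =>
    match (PySem.Dict.mk nodes).get? s with
    | none => none
    | some attrs =>
      match ((PySem.Dict.mk attrs).get? "parent").getD none with
      | none => none
      | some p => if p == "" then none else some p

-- Pre_ excludes inputs whose source- or target-axis parent maps contain a cycle: when such a
-- cycle is reached the Python (A and B alike) loops forever and returns nothing, and whether it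
-- is reached depends on the cells, so Pre_ conservatively requires the parent pointers of those
-- two axes (the only ones either program walks) to be acyclic: from any node, |nodes|+1 parent
-- steps have died out.
def Pre_best_related_axis_nodes_py (axes : List (String × List (String × List (String × Option String)))) (admissible_cells : List (List (String × String))) (source_axis : String) (source_node : String) (target_axis : String) : Prop :=
  ∀ p ∈ axes, p.1 = source_axis ∨ p.1 = target_axis → ∀ q ∈ p.2, (parentStep p.2)^[p.2.length + 1] (some q.1) = none
instance (axes : List (String × List (String × List (String × Option String)))) (admissible_cells : List (List (String × String))) (source_axis : String) (source_node : String) (target_axis : String) : Decidable (Pre_best_related_axis_nodes_py axes admissible_cells source_axis source_node target_axis) := by unfold Pre_best_related_axis_nodes_py; infer_instance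

def pvWitness_best_related_axis_nodes_py : (List (String × List (String × List (String × Option String)))) × (List (List (String × String))) × String × String × String :=
  ([("ax", [("r", []), ("a", [("parent", some "r")]), ("b", [("parent", some "r")])])],
   [[("ax", "a"), ("tx", "b")], [("ax", "b")]], "ax", "a", "ax")

def Spec_best_related_axis_nodes_py (axes : List (String × List (String × List (String × Option String)))) (admissible_cells : List (List (String × String))) (source_axis : String) (source_node : String) (target_axis : String) (out : List String) : Prop := out = best_related_axis_nodes_py_alt axes admissible_cells source_axis source_node target_axis
instance (axes : List (String × List (String × List (String × Option String)))) (admissible_cells : List (List (String × String))) (source_axis : String) (source_node : String) (target_axis : String) (out : List String) : Decidable (Spec_best_related_axis_nodes_py axes admissible_cells source_axis source_node target_axis out) := by unfold Spec_best_related_axis_nodes_py; infer_instance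

-- ===== CLAIM (what is proved, stated in full; the proofs are below) =====
def Claim_equal_best_related_axis_nodes_py : Prop := ∀ (axes : List (String × List (String × List (String × Option String)))) (admissible_cells : List (List (String × String))) (source_axis : String) (source_node : String) (target_axis : String), Dom_best_related_axis_nodes_py axes admissible_cells source_axis source_node target_axis → Pre_best_related_axis_nodes_py axes admissible_cells source_axis source_node target_axis → Spec_best_related_axis_nodes_py axes admissible_cells source_axis source_node target_axis (best_related_axis_nodes_py axes admissible_cells source_axis source_node target_axis)

-- ===== LEMMAS AND PROOFS =====

-- proof-side abstraction of B's accumulation step on an already-built candidate 4-tuple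
def bStep (st : Option ((Int × Int) × PySem.Set (Int × String))) (c : Int × Int × Int × String) : Option ((Int × Int) × PySem.Set (Int × String)) :=
  let rank := (c.1, c.2.1)
  let item := (c.2.2.1, c.2.2.2)
  match st with
  | none => some (rank, PySem.Set.ofList [item])
  | some (best_rank, best_items) =>
    if rank.1 < best_rank.1 || (rank.1 == best_rank.1 && rank.2 < best_rank.2) then
      some (rank, PySem.Set.ofList [item])
    else if rank == best_rank then some (best_rank, PySem.Set.add best_items item)
    else some (best_rank, best_items)

-- the rank and item projections of a candidate
def rnk (c : Int × Int × Int × String) : Int × Int := (c.1, c.2.1)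
def itm (c : Int × Int × Int × String) : Int × String := (c.2.2.1, c.2.2.2)
-- lexicographic ≤ on ranks (what Python's tuple comparison means)
def rnkLe (a b : Int × Int) : Prop := a.1 < b.1 ∨ (a.1 = b.1 ∧ a.2 ≤ b.2)

lemma rnkLe_refl (a : Int × Int) : rnkLe a a := by unfold rnkLe; omega

lemma rnkLe_trans {a b c : Int × Int} (h1 : rnkLe a b) (h2 : rnkLe b c) : rnkLe a c := by
  unfold rnkLe at *; omega

lemma rnkLe_antisymm {a b : Int × Int} (h1 : rnkLe a b) (h2 : rnkLe b a) : a = b := by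
  unfold rnkLe at *
  have : a.1 = b.1 ∧ a.2 = b.2 := by omega
  exact Prod.ext this.1 this.2

-- A's candidate-collecting loop is the filterMap of the per-cell computation
lemma A_candidates (axes : List (String × List (String × List (String × Option String)))) (source_axis source_node target_axis : String) :
    ∀ (cells : List (List (String × String))) (acc : List (Int × Int × Int × String)),
      cells.foldl (fun acc cell =>
        match candOf axes source_axis source_node target_axis cell with
        | none => acc
        | some c => acc ++ [c]) acc
      = acc ++ cells.filterMap (candOf axes source_axis source_node target_axis) := by
  intro cells
  induction cells with
  | nil => intro acc; simp
  | cons x xs ih =>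
    intro acc
    simp only [List.foldl_cons, List.filterMap_cons]
    cases candOf axes source_axis source_node target_axis x <;> simp [ih]

-- the fold of bStep over A's filterMap
lemma B_fold (axes : List (String × List (String × List (String × Option String)))) (source_axis source_node target_axis : String) :
    ∀ (cells : List (List (String × String))) (st : Option ((Int × Int) × PySem.Set (Int × String))),
      cells.foldl (fun st cell =>
        match candOf axes source_axis source_node target_axis cell with
        | none => st
        | some c => bStep st c) st
      = (cells.filterMap (candOf axes source_axis source_node target_axis)).foldl bStep st := by
  intro cells
  induction cells with
  | nil => intro st; rfl
  | cons x xs ih =>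
    intro st
    simp only [List.foldl_cons, List.filterMap_cons]
    cases candOf axes source_axis source_node target_axis x <;> simp [ih]

-- ==== chainStops facts (the parent chains terminate under Pre_) ====

-- fueled form of Pre_'s condition, matching the shape of the ports' loops
def chainStops (nodes : List (String × List (String × Option String))) : Nat → String → Bool
  | 0, _ => false
  | fuel + 1, current =>
    match (PySem.Dict.mk nodes).get? current with
    | none => true
    | some attrs =>
      match ((PySem.Dict.mk attrs).get? "parent").getD none with
      | none => true
      | some p => if p == "" then true else chainStops nodes fuel p

lemma parentStep_iterate_none (nodes : List (String × List (String × Option String))) :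
    ∀ f : Nat, (parentStep nodes)^[f] none = none := by
  intro f
  induction f with
  | zero => rfl
  | succ f ih => rw [Function.iterate_succ_apply, show parentStep nodes none = none from rfl, ih]

lemma chainStops_iff_iterate (nodes : List (String × List (String × Option String))) :
    ∀ (f : Nat) (q : String), chainStops nodes f q = true ↔ (parentStep nodes)^[f] (some q) = none := by
  intro f
  induction f with
  | zero =>
    intro q
    simp [chainStops]
  | succ f ih =>
    intro q
    rw [Function.iterate_succ_apply]
    conv_lhs => unfold chainStops
    cases h1 : (PySem.Dict.mk nodes).get? q with
    | none =>
      have hs : parentStep nodes (some q) = none := by simp [parentStep, h1]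
      rw [hs, parentStep_iterate_none]
      simp
    | some attrs =>
      cases h2 : ((PySem.Dict.mk attrs).get? "parent").getD none with
      | none =>
        have hs : parentStep nodes (some q) = none := by simp [parentStep, h1, h2]
        rw [hs, parentStep_iterate_none]
        simp [h2]
      | some p =>
        by_cases hp : p = ""
        · have hs : parentStep nodes (some q) = none := by simp [parentStep, h1, h2, hp]
          rw [hs, parentStep_iterate_none]
          simp [h2, hp]
        · have hs : parentStep nodes (some q) = some p := by simp [parentStep, h1, h2, hp]
          rw [hs]
          simp only [h2, show (p == "") = false from by simp [hp], Bool.false_eq_true, if_false]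
          simpa [hp] using ih p

lemma bParent_eq (axes : List (String × List (String × List (String × Option String)))) (axis cur : String) :
    bParent (axisNodes axes axis) cur = pyParent axes axis cur := rfl

lemma chainStops_succ (axes : List (String × List (String × List (String × Option String)))) (axis : String) (f : Nat) (cur : String) :
    chainStops (axisNodes axes axis) (f + 1) cur =
      if pyTruthy (pyParent axes axis cur) then chainStops (axisNodes axes axis) f ((pyParent axes axis cur).getD "") else true := by
  conv_lhs => unfold chainStops
  unfold pyParent
  cases h1 : (PySem.Dict.mk (axisNodes axes axis)).get? cur with
  | none => simp [pyTruthy]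
  | some attrs =>
    cases h2 : ((PySem.Dict.mk attrs).get? "parent").getD none with
    | none => simp [pyTruthy, h2]
    | some p =>
      by_cases hp : p = "" <;> simp [pyTruthy, h2, hp]

lemma chainStops_mono (axes : List (String × List (String × List (String × Option String)))) (axis : String) :
    ∀ (f g : Nat) (cur : String), f ≤ g → chainStops (axisNodes axes axis) f cur = true →
      chainStops (axisNodes axes axis) g cur = true := by
  intro f
  induction f with
  | zero => intro g cur _ h; exact absurd h (by simp [chainStops])
  | succ f ih =>
    intro g cur hfg h
    obtain ⟨g', rfl⟩ : ∃ g', g = g' + 1 := ⟨g - 1, by omega⟩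
    rw [chainStops_succ] at h ⊢
    by_cases ht : pyTruthy (pyParent axes axis cur) = true
    · rw [if_pos ht] at h ⊢
      exact ih g' _ (by omega) h
    · rw [if_neg ht]

-- Pre_ restricted to one axis's node map
lemma pre_axis {axes : List (String × List (String × List (String × Option String)))}
    {admissible_cells : List (List (String × String))} {source_axis source_node target_axis : String}
    (hpre : Pre_best_related_axis_nodes_py axes admissible_cells source_axis source_node target_axis)
    (axis : String) (hax : axis = source_axis ∨ axis = target_axis) :
    ∀ q ∈ axisNodes axes axis, chainStops (axisNodes axes axis) ((axisNodes axes axis).length + 1) q.1 = true := by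
  intro q hq
  unfold axisNodes at hq ⊢
  cases hg : (PySem.Dict.mk axes).get? axis with
  | none => rw [hg] at hq; simp at hq
  | some nodes =>
    rw [hg] at hq
    simp only [Option.getD_some] at hq ⊢
    exact (chainStops_iff_iterate nodes _ q.1).mpr (hpre (axis, nodes) (PySem.Dict.mem_items_of_get?_eq_some _ hg) hax q hq)

-- under Pre_, every parent chain (from any start) stops within the fuel of either port
lemma chainStops_all {axes : List (String × List (String × List (String × Option String)))}
    {admissible_cells : List (List (String × String))} {source_axis source_node target_axis : String}
    (hpre : Pre_best_related_axis_nodes_py axes admissible_cells source_axis source_node target_axis)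
    (axis s : String) (hax : axis = source_axis ∨ axis = target_axis) :
    chainStops (axisNodes axes axis) ((axisNodes axes axis).length + 2) s = true := by
  by_cases hk : ((PySem.Dict.mk (axisNodes axes axis)).get? s).isSome
  · obtain ⟨attrs, hattrs⟩ := Option.isSome_iff_exists.mp hk
    have hmem : (s, attrs) ∈ axisNodes axes axis := PySem.Dict.mem_items_of_get?_eq_some _ hattrs
    exact chainStops_mono axes axis _ _ s (by omega) (pre_axis hpre axis hax (s, attrs) hmem)
  · rw [chainStops_succ]
    have : pyParent axes axis s = none := by
      unfold pyParent
      cases hg : (PySem.Dict.mk (axisNodes axes axis)).get? s with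
      | none => rfl
      | some attrs => rw [hg] at hk; simp at hk
    rw [this]
    simp [pyTruthy]

-- ==== the ancestor chain vs A's loops ====

lemma depthGo_falsy (axes : List (String × List (String × List (String × Option String)))) (axis : String)
    (f : Nat) (cur : Option String) (d : Int) (h : ¬ pyTruthy cur = true) :
    nodeDepthGo axes axis f cur d = d := by
  cases f with
  | zero => rfl
  | succ f => unfold nodeDepthGo; rw [if_neg h]

-- A's depth loop computes (chain length - 1), fuel for fuel
lemma depth_chain (axes : List (String × List (String × List (String × Option String)))) (axis : String) :
    ∀ (f : Nat) (s : String) (d : Int), pyTruthy (some s) = true →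
      nodeDepthGo axes axis f (some s) d = d + ((chainGo (axisNodes axes axis) f s).length : Int) - 1 := by
  intro f
  induction f with
  | zero => intro s d _; simp [nodeDepthGo, chainGo]
  | succ f ih =>
    intro s d hs
    unfold nodeDepthGo chainGo
    rw [if_pos hs, bParent_eq]
    simp only [Option.getD_some]
    show nodeDepthGo axes axis f (pyParent axes axis s) _ = _
    by_cases ht : pyTruthy (pyParent axes axis s) = true
    · obtain ⟨q, hq⟩ : ∃ q, pyParent axes axis s = some q := by
        cases hpp : pyParent axes axis s with
        | none => rw [hpp] at ht; exact absurd ht (by simp [pyTruthy])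
        | some q => exact ⟨q, rfl⟩
      rw [if_pos ht, if_pos ht, hq]
      have hq' : pyTruthy (some q) = true := hq ▸ ht
      rw [ih q (d + 1) hq']
      simp only [Option.getD_some, List.length_cons]
      push_cast
      ring
    · rw [if_neg ht, if_neg ht, depthGo_falsy axes axis f _ d ht]
      simp

-- B's position map is literally A's left_distances dict
lemma pos_left (axes : List (String × List (String × List (String × Option String)))) (axis : String) :
    ∀ (f : Nat) (cur : String) (k : Int) (d : PySem.Dict String Int),
      (PySem.List.enumerate (chainGo (axisNodes axes axis) f cur) k).foldl (fun d p => d.insert p.2 p.1) d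
      = leftDistGo axes axis f cur k (d.insert cur k) := by
  intro f
  induction f with
  | zero =>
    intro cur k d
    simp [chainGo, leftDistGo, PySem.List.enumerate_cons, PySem.List.enumerate_nil]
  | succ f ih =>
    intro cur k d
    unfold chainGo leftDistGo
    rw [bParent_eq]
    by_cases ht : pyTruthy (pyParent axes axis cur) = true
    · rw [if_pos ht, if_pos ht]
      rw [PySem.List.enumerate_cons]
      simp only [List.foldl_cons]
      exact ih _ (k + 1) (d.insert cur k)
    · rw [if_neg ht, if_neg ht]
      simp [PySem.List.enumerate_cons, PySem.List.enumerate_nil]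

-- B's meet loop is A's right walk, under termination of the chain
lemma meet_right (axes : List (String × List (String × List (String × Option String)))) (axis : String) (pos : PySem.Dict String Int) :
    ∀ (f : Nat) (cur : String) (k : Int) (g : Nat),
      chainStops (axisNodes axes axis) f cur = true → f ≤ g →
      meetGo pos (PySem.List.enumerate (chainGo (axisNodes axes axis) g cur) k) = rightGo axes axis pos g cur k := by
  intro f
  induction f with
  | zero => intro cur k g hstop _; exact absurd hstop (by simp [chainStops])
  | succ f ih =>
    intro cur k g hstop hle
    obtain ⟨g', rfl⟩ : ∃ g', g = g' + 1 := ⟨g - 1, by omega⟩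
    rw [chainStops_succ] at hstop
    unfold chainGo rightGo
    rw [bParent_eq]
    by_cases ht : pyTruthy (pyParent axes axis cur) = true
    · rw [if_pos ht] at hstop ⊢
      rw [PySem.List.enumerate_cons]
      unfold meetGo
      cases h : pos.get? cur with
      | some i => rfl
      | none =>
        rw [if_pos ht]
        exact ih _ (k + 1) g' hstop (by omega)
    · rw [if_neg ht] at hstop ⊢
      rw [PySem.List.enumerate_cons, PySem.List.enumerate_nil]
      unfold meetGo
      cases h : pos.get? cur with
      | some i => rfl
      | none => rw [if_neg ht]; rfl

-- every member of the chain hanging off cur's parent stops with strictly less fuel than cur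
lemma stop_of_mem_tail (axes : List (String × List (String × List (String × Option String)))) (axis : String) :
    ∀ (g : Nat) (cur y : String) (f : Nat),
      chainStops (axisNodes axes axis) (f + 1) cur = true →
      pyTruthy (pyParent axes axis cur) = true →
      y ∈ chainGo (axisNodes axes axis) g ((pyParent axes axis cur).getD "") →
      ∃ f' ≤ f, chainStops (axisNodes axes axis) f' y = true := by
  intro g
  induction g with
  | zero =>
    intro cur y f hstop ht hy
    simp only [chainGo, List.mem_singleton] at hy
    subst hy
    rw [chainStops_succ, if_pos ht] at hstop
    exact ⟨f, le_refl f, hstop⟩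
  | succ g ih =>
    intro cur y f hstop ht hy
    rw [chainStops_succ, if_pos ht] at hstop
    unfold chainGo at hy
    rw [bParent_eq] at hy
    by_cases ht2 : pyTruthy (pyParent axes axis ((pyParent axes axis cur).getD "")) = true
    · rw [if_pos ht2] at hy
      rcases List.mem_cons.mp hy with h | h
      · subst h; exact ⟨f, le_refl f, hstop⟩
      · obtain ⟨f'', rfl⟩ : ∃ f'', f = f'' + 1 := by
          cases f with
          | zero => exact absurd hstop (by simp [chainStops])
          | succ n => exact ⟨n, rfl⟩
        obtain ⟨f', hf', hs⟩ := ih ((pyParent axes axis cur).getD "") y f'' hstop ht2 h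
        exact ⟨f', by omega, hs⟩
    · rw [if_neg ht2] at hy
      simp only [List.mem_singleton] at hy
      subst hy
      exact ⟨f, le_refl f, hstop⟩

-- hence, under termination, a node never reappears in its own ancestor chain …
lemma head_not_in_tail (axes : List (String × List (String × List (String × Option String)))) (axis : String)
    (cur : String) (N : Nat) (hN : chainStops (axisNodes axes axis) N cur = true)
    (g : Nat) (ht : pyTruthy (pyParent axes axis cur) = true) :
    cur ∉ chainGo (axisNodes axes axis) g ((pyParent axes axis cur).getD "") := by
  intro hmem
  have hex : ∃ n, chainStops (axisNodes axes axis) n cur = true := ⟨N, hN⟩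
  have hspec := Nat.find_spec hex
  obtain ⟨n', hn'⟩ : ∃ n', Nat.find hex = n' + 1 := by
    cases hfind : Nat.find hex with
    | zero => rw [hfind] at hspec; exact absurd hspec (by simp [chainStops])
    | succ n => exact ⟨n, rfl⟩
  rw [hn'] at hspec
  obtain ⟨f', hf', hs⟩ := stop_of_mem_tail axes axis g cur cur n' hspec ht hmem
  exact Nat.find_min hex (show f' < Nat.find hex by omega) hs

-- inserting pairs whose keys avoid x leaves x's binding alone
lemma fold_get_skip (l : List (Int × String)) (x : String) (hx : ∀ p ∈ l, p.2 ≠ x) :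
    ∀ d : PySem.Dict String Int, (l.foldl (fun d p => d.insert p.2 p.1) d).get? x = d.get? x := by
  induction l with
  | nil => intro d; rfl
  | cons p l ih =>
    intro d
    simp only [List.foldl_cons]
    rw [ih (fun q hq => hx q (List.mem_cons_of_mem _ hq)) _,
        PySem.Dict.get?_insert_of_ne _ _ (fun h => hx p (List.mem_cons_self ..) h.symm)]

-- every chain starts with its own head
lemma chain_cons (nodes : List (String × List (String × Option String))) (g : Nat) (cur : String) :
    ∃ rest, chainGo nodes g cur = cur :: rest := by
  cases g with
  | zero => exact ⟨[], rfl⟩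
  | succ g =>
    unfold chainGo
    by_cases ht : pyTruthy (bParent nodes cur) = true
    · rw [if_pos ht]; exact ⟨_, rfl⟩
    · rw [if_neg ht]; exact ⟨[], rfl⟩

-- … so its position map maps it to 0
lemma pos_head (axes : List (String × List (String × List (String × Option String)))) (axis : String)
    (cur : String) (N : Nat) (hN : chainStops (axisNodes axes axis) N cur = true) (g : Nat) :
    (posOf (chainGo (axisNodes axes axis) g cur)).get? cur = some 0 := by
  have hsnd : ∀ {xs : List String} {s : Int} {p : Int × String}, p ∈ PySem.List.enumerate xs s → p.2 ∈ xs := by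
    intro xs s p hp
    rw [← PySem.List.map_snd_enumerate xs s]
    exact List.mem_map.mpr ⟨p, hp, rfl⟩
  cases g with
  | zero =>
    simp [chainGo, posOf, PySem.List.enumerate_cons, PySem.List.enumerate_nil,
      PySem.Dict.get?_insert_self]
  | succ g =>
    unfold posOf chainGo
    rw [bParent_eq]
    by_cases ht : pyTruthy (pyParent axes axis cur) = true
    · rw [if_pos ht, PySem.List.enumerate_cons]
      simp only [List.foldl_cons]
      have hnot := head_not_in_tail axes axis cur N hN g ht
      rw [fold_get_skip _ cur (fun p hp h => hnot (by have hm := hsnd hp; rwa [h] at hm)) _]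
      simp [PySem.Dict.get?_insert_self]
    · rw [if_neg ht, PySem.List.enumerate_cons, PySem.List.enumerate_nil]
      simp [PySem.Dict.get?_insert_self]

-- ==== B's per-cell body = A's candidate fed to the accumulation step ====

lemma body_eq {axes : List (String × List (String × List (String × Option String)))}
    {admissible_cells : List (List (String × String))} {source_axis source_node target_axis : String}
    (hpre : Pre_best_related_axis_nodes_py axes admissible_cells source_axis source_node target_axis)
    (hin : (PySem.Dict.mk (axisNodes axes source_axis)).contains source_node = true)
    (st : Option ((Int × Int) × PySem.Set (Int × String))) (cell : List (String × String)) :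
    bStep2 (axisNodes axes source_axis) (axisNodes axes target_axis)
      (posOf (ancestorChain (axisNodes axes source_axis) source_node)) source_axis target_axis st cell
    = match candOf axes source_axis source_node target_axis cell with
      | none => st
      | some c => bStep st c := by
  by_cases h1 : (!(pyTruthy ((PySem.Dict.mk cell).get? source_axis)) || !(pyTruthy ((PySem.Dict.mk cell).get? target_axis))) = true
  · simp only [bStep2, candOf, h1, if_true]
  · rw [Bool.not_eq_true] at h1
    have htr : pyTruthy ((PySem.Dict.mk cell).get? source_axis) = true ∧ pyTruthy ((PySem.Dict.mk cell).get? target_axis) = true := by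
      constructor <;> [skip; skip] <;>
        (first
          | exact by
              rcases Bool.or_eq_false_iff.mp h1 with ⟨ha, _⟩
              simpa using ha
          | exact by
              rcases Bool.or_eq_false_iff.mp h1 with ⟨_, hb⟩
              simpa using hb)
    have hsT : pyTruthy (some (((PySem.Dict.mk cell).get? source_axis).getD "")) = true := by
      cases h : (PySem.Dict.mk cell).get? source_axis with
      | none => rw [h] at htr; exact absurd htr.1 (by simp [pyTruthy])
      | some v =>
        have hv := htr.1
        rw [h] at hv
        simpa using hv
    have htT : pyTruthy (some (((PySem.Dict.mk cell).get? target_axis).getD "")) = true := by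
      cases h : (PySem.Dict.mk cell).get? target_axis with
      | none => rw [h] at htr; exact absurd htr.2 (by simp [pyTruthy])
      | some v =>
        have hv := htr.2
        rw [h] at hv
        simpa using hv
    by_cases h2 : (PySem.Dict.mk (axisNodes axes source_axis)).contains (((PySem.Dict.mk cell).get? source_axis).getD "") = true
    · have hdist : meetGo (posOf (ancestorChain (axisNodes axes source_axis) source_node))
          (PySem.List.enumerate (ancestorChain (axisNodes axes source_axis) (((PySem.Dict.mk cell).get? source_axis).getD "")))
          = branchDistance axes source_axis source_node (((PySem.Dict.mk cell).get? source_axis).getD "") := by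
        unfold branchDistance
        rw [if_neg (by simp [hin, h2])]
        by_cases heq : (source_node == ((PySem.Dict.mk cell).get? source_axis).getD "") = true
        · rw [if_pos heq]
          have he : ((PySem.Dict.mk cell).get? source_axis).getD "" = source_node := (beq_iff_eq.mp heq).symm
          rw [he]
          unfold ancestorChain
          obtain ⟨rest, hrest⟩ := chain_cons (axisNodes axes source_axis) ((axisNodes axes source_axis).length + 2) source_node
          conv_lhs => rw [hrest]
          rw [PySem.List.enumerate_cons]
          unfold meetGo
          rw [← hrest, show chainGo (axisNodes axes source_axis) ((axisNodes axes source_axis).length + 2) source_node = ancestorChain (axisNodes axes source_axis) source_node from rfl]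
          rw [show (posOf (ancestorChain (axisNodes axes source_axis) source_node)).get? source_node = some 0 from
            pos_head axes source_axis source_node _ (chainStops_all hpre source_axis source_node (Or.inl rfl)) _]
          norm_num
        · rw [if_neg heq]
          unfold ancestorChain posOf
          rw [pos_left axes source_axis]
          exact meet_right axes source_axis _ ((axisNodes axes source_axis).length + 2) _ 0 _
            (chainStops_all hpre source_axis _ (Or.inl rfl)) le_rfl
      have hdS : (1 : Int) - ((ancestorChain (axisNodes axes source_axis) (((PySem.Dict.mk cell).get? source_axis).getD "")).length : Int)
          = -(nodeDepth axes source_axis (((PySem.Dict.mk cell).get? source_axis).getD "")) := by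
        unfold nodeDepth ancestorChain
        rw [depth_chain axes source_axis _ _ 0 hsT]
        omega
      have hdT : ((ancestorChain (axisNodes axes target_axis) (((PySem.Dict.mk cell).get? target_axis).getD "")).length : Int) - 1
          = nodeDepth axes target_axis (((PySem.Dict.mk cell).get? target_axis).getD "") := by
        unfold nodeDepth ancestorChain
        rw [depth_chain axes target_axis _ _ 0 htT]
        omega
      simp only [bStep2, candOf, h1, Bool.false_eq_true, if_false, h2, Bool.not_true, hdist, hdS, hdT]
      cases hd : branchDistance axes source_axis source_node (((PySem.Dict.mk cell).get? source_axis).getD "") with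
      | none => rfl
      | some dist => rfl
    · rw [Bool.not_eq_true] at h2
      have hbd : branchDistance axes source_axis source_node (((PySem.Dict.mk cell).get? source_axis).getD "") = none := by
        unfold branchDistance
        rw [if_pos (by simp [h2])]
      simp only [bStep2, candOf, h1, Bool.false_eq_true, if_false, h2, Bool.not_false, if_true, hbd]

-- if the source node is unknown every candidate of A is dropped
lemma cand_none {axes : List (String × List (String × List (String × Option String)))} {source_axis source_node target_axis : String}
    (hout : ¬ (PySem.Dict.mk (axisNodes axes source_axis)).contains source_node = true)
    (cell : List (String × String)) :
    candOf axes source_axis source_node target_axis cell = none := by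
  rw [Bool.not_eq_true] at hout
  unfold candOf
  by_cases h1 : (!(pyTruthy ((PySem.Dict.mk cell).get? source_axis)) || !(pyTruthy ((PySem.Dict.mk cell).get? target_axis))) = true
  · simp [h1]
  · have hbd : branchDistance axes source_axis source_node (((PySem.Dict.mk cell).get? source_axis).getD "") = none := by
      unfold branchDistance
      rw [if_pos (by simp [hout])]
    rw [Bool.not_eq_true] at h1
    simp only [h1, Bool.false_eq_true, if_false, hbd]

-- B's fold invariant: starting from some (r, S) with S nodup, the fold returns the lexicographic
-- minimum rank m together with a nodup list holding S (iff m = r) plus the items of rank m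
lemma bStep_inv : ∀ (cs : List (Int × Int × Int × String)) (r : Int × Int) (S : PySem.Set (Int × String)), S.Nodup →
    ∃ m T, cs.foldl bStep (some (r, S)) = some (m, T) ∧ T.Nodup ∧ rnkLe m r ∧
      (∀ c ∈ cs, rnkLe m (rnk c)) ∧ (m = r ∨ ∃ c ∈ cs, rnk c = m) ∧
      (∀ x, x ∈ T ↔ ((m = r ∧ x ∈ S) ∨ ∃ c ∈ cs, rnk c = m ∧ itm c = x)) := by
  intro cs
  induction cs with
  | nil =>
    intro r S hS
    exact ⟨r, S, rfl, hS, rnkLe_refl r, by simp, Or.inl rfl, by simp⟩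
  | cons c cs ih =>
    intro r S hS
    simp only [List.foldl_cons]
    by_cases hlt : c.1 < r.1 ∨ (c.1 = r.1 ∧ c.2.1 < r.2)
    · have hstep : bStep (some (r, S)) c = some (rnk c, PySem.Set.ofList [itm c]) := by
        simp only [bStep]
        rw [if_pos (by simp only [Bool.or_eq_true, Bool.and_eq_true, decide_eq_true_eq, beq_iff_eq]; omega)]
        rfl
      rw [hstep]
      obtain ⟨m, T, hfold, hT, hle, hall, hatt, hmem⟩ := ih (rnk c) (PySem.Set.ofList [itm c]) (PySem.Set.nodup_ofList _)
      have hmc : rnkLe (rnk c) r := by unfold rnkLe rnk; omega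
      refine ⟨m, T, hfold, hT, rnkLe_trans hle hmc, ?_, ?_, ?_⟩
      · intro c' hc'
        rcases List.mem_cons.mp hc' with h | h
        · subst h; exact hle
        · exact hall c' h
      · rcases hatt with h | ⟨c', hc', h⟩
        · exact Or.inr ⟨c, List.mem_cons_self .., h ▸ rfl⟩
        · exact Or.inr ⟨c', List.mem_cons_of_mem _ hc', h⟩
      · intro x
        rw [hmem x]
        have hmr : m ≠ r := by
          intro h; subst h
          unfold rnkLe rnk at hle; omega
        constructor
        · rintro (⟨h1, h2⟩ | ⟨c', hc', h1, h2⟩)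
          · simp only [PySem.Set.mem_ofList, List.mem_singleton] at h2
            exact Or.inr ⟨c, List.mem_cons_self .., h1.symm, h2.symm⟩
          · exact Or.inr ⟨c', List.mem_cons_of_mem _ hc', h1, h2⟩
        · rintro (⟨h1, _⟩ | ⟨c', hc', h1, h2⟩)
          · exact absurd h1 hmr
          · rcases List.mem_cons.mp hc' with h | h
            · subst h
              exact Or.inl ⟨h1.symm, by simp [PySem.Set.mem_ofList, h2.symm]⟩
            · exact Or.inr ⟨c', h, h1, h2⟩
    · have hrc : rnkLe r (rnk c) := by unfold rnkLe rnk; omega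
      by_cases heq : rnk c = r
      · have hstep : bStep (some (r, S)) c = some (r, PySem.Set.add S (itm c)) := by
          simp only [bStep]
          rw [if_neg (by simp only [Bool.or_eq_true, Bool.and_eq_true, decide_eq_true_eq, beq_iff_eq]; omega),
              if_pos (by simpa only [beq_iff_eq] using heq)]
          rfl
        rw [hstep]
        obtain ⟨m, T, hfold, hT, hle, hall, hatt, hmem⟩ := ih r (PySem.Set.add S (itm c)) (PySem.Set.nodup_add _ _ hS)
        refine ⟨m, T, hfold, hT, hle, ?_, ?_, ?_⟩
        · intro c' hc'
          rcases List.mem_cons.mp hc' with h | h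
          · subst h; exact heq ▸ hle
          · exact hall c' h
        · rcases hatt with h | ⟨c', hc', h⟩
          · exact Or.inl h
          · exact Or.inr ⟨c', List.mem_cons_of_mem _ hc', h⟩
        · intro x
          rw [hmem x]
          constructor
          · rintro (⟨h1, h2⟩ | ⟨c', hc', h1, h2⟩)
            · rw [PySem.Set.mem_add] at h2
              rcases h2 with h2 | h2
              · exact Or.inl ⟨h1, h2⟩
              · exact Or.inr ⟨c, List.mem_cons_self .., heq.trans h1.symm, h2.symm⟩
            · exact Or.inr ⟨c', List.mem_cons_of_mem _ hc', h1, h2⟩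
          · rintro (⟨h1, h2⟩ | ⟨c', hc', h1, h2⟩)
            · exact Or.inl ⟨h1, by rw [PySem.Set.mem_add]; exact Or.inl h2⟩
            · rcases List.mem_cons.mp hc' with h | h
              · subst h
                exact Or.inl ⟨h1.symm.trans heq, by rw [PySem.Set.mem_add]; exact Or.inr h2.symm⟩
              · exact Or.inr ⟨c', h, h1, h2⟩
      · have hstep : bStep (some (r, S)) c = some (r, S) := by
          simp only [bStep]
          rw [if_neg (by simp only [Bool.or_eq_true, Bool.and_eq_true, decide_eq_true_eq, beq_iff_eq]; omega),
              if_neg (by simpa only [beq_iff_eq] using heq)]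
        rw [hstep]
        obtain ⟨m, T, hfold, hT, hle, hall, hatt, hmem⟩ := ih r S hS
        have hcm : rnk c ≠ m := by
          intro h; rw [h] at hrc; apply heq; rw [h]; exact rnkLe_antisymm hle hrc
        refine ⟨m, T, hfold, hT, hle, ?_, ?_, ?_⟩
        · intro c' hc'
          rcases List.mem_cons.mp hc' with h | h
          · subst h; exact rnkLe_trans hle hrc
          · exact hall c' h
        · rcases hatt with h | ⟨c', hc', h⟩
          · exact Or.inl h
          · exact Or.inr ⟨c', List.mem_cons_of_mem _ hc', h⟩
        · intro x
          rw [hmem x]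
          constructor
          · rintro (h | ⟨c', hc', h1, h2⟩)
            · exact Or.inl h
            · exact Or.inr ⟨c', List.mem_cons_of_mem _ hc', h1, h2⟩
          · rintro (h | ⟨c', hc', h1, h2⟩)
            · exact Or.inl h
            · rcases List.mem_cons.mp hc' with h | h
              · exact absurd (h ▸ h1) hcm
              · exact Or.inr ⟨c', h, h1, h2⟩

-- the head of A's fully sorted candidate list attains the lexicographic minimum rank
lemma head_rank_min {cs : List (Int × Int × Int × String)} {c0 : Int × Int × Int × String}
    {t : List (Int × Int × Int × String)}
    (h : PySem.List.sorted cs cKey false = c0 :: t) :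
    c0 ∈ cs ∧ ∀ c ∈ cs, rnkLe (rnk c0) (rnk c) := by
  constructor
  · have hm := (PySem.List.mem_sorted (xs := cs) (key := cKey) (rev := false) (x := c0))
    rw [h] at hm
    exact hm.mp (List.mem_cons_self ..)
  · intro c hc
    have hle := PySem.List.key_head_sorted_le cs cKey h c hc
    simp only [cKey, Prod.Lex.le_iff, ofLex_toLex] at hle
    unfold rnkLe rnk
    rcases hle with h1 | ⟨h1, h2⟩
    · exact Or.inl h1
    · rcases h2 with h2 | ⟨h2, _⟩
      · exact Or.inr ⟨h1, le_of_lt h2⟩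
      · exact Or.inr ⟨h1, le_of_eq h2⟩

lemma itemKey_injective : Function.Injective itemKey := by
  intro a b h
  unfold itemKey at h
  rw [toLex_inj, Prod.ext_iff] at h
  obtain ⟨h1, h2⟩ := h
  rw [toLex_inj, Prod.ext_iff] at h2
  exact Prod.ext h1 h2.2

-- the heart of the equivalence: on any candidate list, A's sort-then-filter-by-minimum
-- equals B's single min-scan
lemma ab_eq (cs : List (Int × Int × Int × String)) :
    (if cs.isEmpty then ([] : List String)
     else
       (PySem.List.sorted
         (PySem.Set.ofList
           (((PySem.List.sorted cs cKey false).filter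
               (fun c => (c.1, c.2.1) == (((PySem.List.sorted cs cKey false).headD (0, 0, 0, "")).1,
                                          ((PySem.List.sorted cs cKey false).headD (0, 0, 0, "")).2.1))).map
             (fun c => (c.2.2.1, c.2.2.2))))
         itemKey false).map (·.2))
    = (match cs.foldl bStep none with
       | none => []
       | some (_, best_items) => (PySem.List.sorted best_items itemKey false).map (·.2)) := by
  cases hcs : cs with
  | nil => rfl
  | cons c rest =>
    simp only [List.isEmpty_cons, Bool.false_eq_true, if_false]
    have hfirst : bStep none c = some (rnk c, PySem.Set.ofList [itm c]) := rfl
    obtain ⟨m, T, hfold, hT, hle, hall, hatt, hmem⟩ :=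
      bStep_inv rest (rnk c) (PySem.Set.ofList [itm c]) (PySem.Set.nodup_ofList _)
    rw [List.foldl_cons, hfirst, hfold]
    obtain ⟨c0, t, hsorted⟩ : ∃ c0 t, PySem.List.sorted (c :: rest) cKey false = c0 :: t := by
      cases hs : PySem.List.sorted (c :: rest) cKey false with
      | nil => exact absurd ((PySem.List.sorted_eq_nil_iff _ _ _).mp hs) (List.cons_ne_nil c rest)
      | cons a b => exact ⟨a, b, rfl⟩
    obtain ⟨hc0mem, hc0min⟩ := head_rank_min hsorted
    have hmin : m = rnk c0 := by
      apply rnkLe_antisymm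
      · rcases List.mem_cons.mp hc0mem with h | h
        · exact h ▸ hle
        · exact hall c0 h
      · rcases hatt with h | ⟨c', hc', h⟩
        · exact h ▸ hc0min c (List.mem_cons_self ..)
        · exact h ▸ hc0min c' (List.mem_cons_of_mem _ hc')
    rw [hsorted]
    simp only [List.headD_cons]
    show (PySem.List.sorted _ itemKey false).map (·.2) = (PySem.List.sorted T itemKey false).map (·.2)
    refine congrArg _ ?_
    apply PySem.List.sorted_eq_sorted_of_perm _ _ itemKey itemKey_injective
    rw [List.perm_ext_iff_of_nodup (PySem.Set.nodup_ofList _) hT]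
    intro x
    have hms : ∀ y, y ∈ c0 :: t ↔ y ∈ c :: rest := by
      intro y
      rw [← hsorted]
      exact PySem.List.mem_sorted _ _ _ _
    have hA : x ∈ PySem.Set.ofList
        (((c0 :: t).filter (fun c' => (c'.1, c'.2.1) == (c0.1, c0.2.1))).map (fun c' => (c'.2.2.1, c'.2.2.2)))
        ↔ ∃ c' ∈ c :: rest, rnk c' = rnk c0 ∧ itm c' = x := by
      simp only [PySem.Set.mem_ofList, List.mem_map, List.mem_filter, beq_iff_eq]
      constructor
      · rintro ⟨c', ⟨h1, h2⟩, h3⟩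
        exact ⟨c', (hms c').mp h1, h2, h3⟩
      · rintro ⟨c', h1, h2, h3⟩
        exact ⟨c', ⟨(hms c').mpr h1, h2⟩, h3⟩
    have hB : x ∈ T ↔ ∃ c' ∈ c :: rest, rnk c' = rnk c0 ∧ itm c' = x := by
      rw [hmem x]
      constructor
      · rintro (⟨h1, h2⟩ | ⟨c', hc', h1, h2⟩)
        · have h2' : x = itm c := by
            simpa only [PySem.Set.mem_ofList, List.mem_singleton] using h2
          exact ⟨c, List.mem_cons_self .., by rw [← h1]; exact hmin, h2'.symm⟩
        · exact ⟨c', List.mem_cons_of_mem _ hc', h1.trans hmin, h2⟩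
      · rintro ⟨c', hc', h1, h2⟩
        rcases List.mem_cons.mp hc' with h | h
        · refine Or.inl ⟨?_, ?_⟩
          · rw [hmin, ← h1, h]
          · simp only [PySem.Set.mem_ofList, List.mem_singleton]
            rw [← h2, h]
        · exact Or.inr ⟨c', h, h1.trans hmin.symm, h2⟩
    exact hA.trans hB.symm

-- ===== VERDICT (by name: the statement is the Claim_ definition above) =====
theorem best_related_axis_nodes_py_spec : Claim_equal_best_related_axis_nodes_py := by
  intro axes admissible_cells source_axis source_node target_axis _ hpre
  unfold Spec_best_related_axis_nodes_py
  have hB : best_related_axis_nodes_py_alt axes admissible_cells source_axis source_node target_axis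
      = if !((PySem.Dict.mk (axisNodes axes source_axis)).contains source_node) then []
        else
          match admissible_cells.foldl (bStep2 (axisNodes axes source_axis) (axisNodes axes target_axis)
              (posOf (ancestorChain (axisNodes axes source_axis) source_node)) source_axis target_axis) none with
          | none => []
          | some (_, best_items) => (PySem.List.sorted best_items itemKey false).map (·.2) := rfl
  rw [hB]
  by_cases hin : (PySem.Dict.mk (axisNodes axes source_axis)).contains source_node = true
  · rw [hin]
    simp only [Bool.not_true, Bool.false_eq_true, if_false]
    unfold best_related_axis_nodes_py
    rw [show (bStep2 (axisNodes axes source_axis) (axisNodes axes target_axis)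
          (posOf (ancestorChain (axisNodes axes source_axis) source_node)) source_axis target_axis)
        = (fun st cell => match candOf axes source_axis source_node target_axis cell with
            | none => st
            | some c => bStep st c) from funext fun st => funext fun cell => body_eq hpre hin st cell]
    rw [A_candidates, B_fold]
    simpa using ab_eq (admissible_cells.filterMap (candOf axes source_axis source_node target_axis))
  · have hin' := hin
    rw [Bool.not_eq_true] at hin'
    rw [hin']
    simp only [Bool.not_false, if_true]
    unfold best_related_axis_nodes_py
    rw [A_candidates]
    rw [List.filterMap_eq_nil_iff.mpr (fun cell _ => cand_none hin cell)]
    simp
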